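-- pv_equiv track=rewrite | github.com/Pandabug/Homeworks | University/Python/HW6-req/prova_code.py | find_diagonal
-- ===== SOURCE A (Python) =====
-- def find_diagonal(commands):
-- 	# index_of_wrong : int    							= 0
-- 	# pop_last : bool         							= False
-- 	wrong_list : list[str]  							= [
-- 		'NW E SW',
-- 		'SW E NW',
-- 		'NE W SE',
-- 		'SE W NE',
-- 		'SW N SE',
-- 		'SE N SW',
-- 		'NW S NE',
-- 		'NE S NW',
-- 		]
--
--
-- 	try:
-- 		return min(commands.index(x) for x in wrong_list if x in commands)
-- 	except:
-- 		return len(commands) - 4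
-- ===== SOURCE B (Python) =====
-- def find_diagonal(commands):
--     wrong_set = {
--         'NW E SW',
--         'SW E NW',
--         'NE W SE',
--         'SE W NE',
--         'SW N SE',
--         'SE N SW',
--         'NW S NE',
--         'NE S NW',
--     }
--     for i, c in enumerate(commands):
--         if c in wrong_set:
--             return i
--     return len(commands) - 4
-- ===== Notes on version B (the rewrite author's own statement) =====
-- stated objective: faster
-- what changed: B replaces A's eight independent membership scans plus eight .index scans plus a min over their indices by a single left-to-right pass with a set lookup that returns at the first element belonging to the forbidden set.
import Mathlib
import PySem

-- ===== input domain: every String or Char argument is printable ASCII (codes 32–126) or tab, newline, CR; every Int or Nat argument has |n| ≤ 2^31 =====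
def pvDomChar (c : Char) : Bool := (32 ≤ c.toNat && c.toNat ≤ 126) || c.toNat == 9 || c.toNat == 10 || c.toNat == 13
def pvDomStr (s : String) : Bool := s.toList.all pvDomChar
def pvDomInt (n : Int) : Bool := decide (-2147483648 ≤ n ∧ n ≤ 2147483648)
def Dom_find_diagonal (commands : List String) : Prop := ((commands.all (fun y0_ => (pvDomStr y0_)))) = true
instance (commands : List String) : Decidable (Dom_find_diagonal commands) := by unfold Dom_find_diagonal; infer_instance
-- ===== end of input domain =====

-- B changes A's eight whole-list scans + min into one early-exit pass with a set lookup (objective: faster by a constant factor).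

-- ===== PORT A =====
def pvWrongList : List String :=
  ["NW E SW", "SW E NW", "NE W SE", "SE W NE", "SW N SE", "SE N SW", "NW S NE", "NE S NW"]

-- `commands.index(x) for x in wrong_list if x in commands`: `x in commands` holds exactly when
-- PySem.List.index? returns some, so the filtered generator is this filterMap (exact);
-- min of an empty generator raises ValueError, caught by the bare except → len - 4.
def find_diagonal (commands : List String) : Int :=
  match PySem.List.min? (pvWrongList.filterMap (fun x => PySem.List.index? commands x)) (fun y => y) with
  | some m => (m : Int)
  | none => (commands.length : Int) - 4

-- ===== PORT B =====
def pvWrongSet : PySem.Set String :=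
  PySem.Set.ofList ["NW E SW", "SW E NW", "NE W SE", "SE W NE", "SW N SE", "SE N SW", "NW S NE", "NE S NW"]

-- the `for i, c in enumerate(commands)` loop with its early return
def fdGo (cs : List String) (i : Nat) : Option Nat :=
  match cs with
  | [] => none
  | c :: t => if c ∈ pvWrongSet then some i else fdGo t (i + 1)

def find_diagonal_alt (commands : List String) : Int :=
  match fdGo commands 0 with
  | some i => (i : Int)
  | none => (commands.length : Int) - 4

-- ===== PRECONDITION & SPEC =====
def Spec_find_diagonal (commands : List String) (out : Int) : Prop := out = find_diagonal_alt commands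
instance (commands : List String) (out : Int) : Decidable (Spec_find_diagonal commands out) := by unfold Spec_find_diagonal; infer_instance

-- ===== CLAIM (what is proved, stated in full; the proofs are below) =====
def Claim_equal_find_diagonal : Prop := ∀ (commands : List String), Dom_find_diagonal commands → Spec_find_diagonal commands (find_diagonal commands)

-- ===== LEMMAS AND PROOFS =====

theorem mem_wrongSet_iff (c : String) : c ∈ pvWrongSet ↔ c ∈ pvWrongList := by
  simp [pvWrongSet, pvWrongList, PySem.Set.mem_ofList]

theorem fdGo_shift (cs : List String) (n : Nat) :
    fdGo cs n = (fdGo cs 0).map (· + n) := by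
  induction cs generalizing n with
  | nil => simp [fdGo]
  | cons c t ih =>
    by_cases hc : c ∈ pvWrongSet
    · simp [fdGo, hc]
    · simp only [fdGo, if_neg hc, ih (n + 1), ih 1, Option.map_map]
      cases fdGo t 0
      · simp
      · simp; omega

theorem fdGo_eq_none (cs : List String) (n : Nat) :
    fdGo cs n = none ↔ ∀ c ∈ cs, c ∉ pvWrongSet := by
  induction cs generalizing n with
  | nil => simp [fdGo]
  | cons c t ih =>
    by_cases hc : c ∈ pvWrongSet
    · simp [fdGo, hc]
    · simp [fdGo, hc, ih (n + 1)]

theorem fdGo_eq_some (cs : List String) (i : Nat) (h : fdGo cs 0 = some i) :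
    ∃ hi : i < cs.length, cs[i] ∈ pvWrongSet ∧ ∀ j (hj : j < i), cs[j] ∉ pvWrongSet := by
  induction cs generalizing i with
  | nil => simp [fdGo] at h
  | cons c t ih =>
    by_cases hc : c ∈ pvWrongSet
    · simp [fdGo, hc] at h
      subst h
      exact ⟨by simp, by simpa using hc, fun j hj => absurd hj (by omega)⟩
    · simp only [fdGo, if_neg hc] at h
      rw [fdGo_shift t 1] at h
      cases ht : fdGo t 0 with
      | none => rw [ht] at h; simp at h
      | some k =>
        rw [ht] at h; simp at h
        obtain ⟨hk, hmem, hmin⟩ := ih k ht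
        refine ⟨by simp; omega, ?_, ?_⟩
        · have : i = k + 1 := by omega
          subst this; simpa using hmem
        · intro j hj
          match j with
          | 0 => simpa using hc
          | j' + 1 =>
            have : j' < k := by omega
            simpa using hmin j' this

-- index? finds the FIRST occurrence; if nothing before i is in the set and cs[i] = x ∈ set, index? cs x = some i
theorem index?_eq_first (cs : List String) (i : Nat) (hi : i < cs.length)
    (hmem : cs[i] ∈ pvWrongList) (hmin : ∀ j (hj : j < i), cs[j] ∉ pvWrongSet) :
    PySem.List.index? cs cs[i] = some i := by
  have hin : cs[i] ∈ cs := List.getElem_mem hi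
  have hs : (PySem.List.index? cs cs[i]).isSome := (PySem.List.index?_isSome_iff cs cs[i]).2 hin
  cases hk : PySem.List.index? cs cs[i] with
  | none => rw [hk] at hs; simp at hs
  | some k =>
    obtain ⟨hkl, hke, hkf⟩ := PySem.List.getElem_of_index?_eq_some hk
    congr 1
    by_contra hne
    rcases Nat.lt_or_ge k i with hlt | hge
    · exact hmin k hlt ((mem_wrongSet_iff _).2 (hke ▸ hmem))
    · have : i < k := by omega
      exact hkf i this rfl

theorem find_diagonal_equiv (cs : List String) : find_diagonal cs = find_diagonal_alt cs := by
  unfold find_diagonal find_diagonal_alt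
  cases hgo : fdGo cs 0 with
  | none =>
    have hnone : ∀ c ∈ cs, c ∉ pvWrongSet := (fdGo_eq_none cs 0).1 hgo
    have hL : pvWrongList.filterMap (fun x => PySem.List.index? cs x) = [] := by
      rw [List.filterMap_eq_nil_iff]
      intro x hx
      rw [PySem.List.index?_eq_none_iff]
      intro hxc
      exact hnone x hxc ((mem_wrongSet_iff x).2 hx)
    rw [hL]
    simp [PySem.List.min?]
  | some i =>
    obtain ⟨hi, hmem, hmin⟩ := fdGo_eq_some cs i hgo
    have hmemL : cs[i] ∈ pvWrongList := (mem_wrongSet_iff _).1 hmem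
    have hidx : PySem.List.index? cs cs[i] = some i := index?_eq_first cs i hi hmemL hmin
    have hiL : i ∈ pvWrongList.filterMap (fun x => PySem.List.index? cs x) :=
      List.mem_filterMap.2 ⟨cs[i], hmemL, hidx⟩
    have hlow : ∀ m ∈ pvWrongList.filterMap (fun x => PySem.List.index? cs x), i ≤ m := by
      intro m hm
      obtain ⟨x, hxW, hxidx⟩ := List.mem_filterMap.1 hm
      obtain ⟨hml, hme, _⟩ := PySem.List.getElem_of_index?_eq_some hxidx
      by_contra hlt
      exact hmin m (by omega) ((mem_wrongSet_iff _).2 (hme ▸ hxW))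
    cases hmq : PySem.List.min? (pvWrongList.filterMap (fun x => PySem.List.index? cs x)) (fun y => y) with
    | none =>
      rw [PySem.List.min?_eq_none_iff] at hmq
      rw [hmq] at hiL; simp at hiL
    | some m =>
      have hmmem := PySem.List.min?_mem hmq
      have hmle : (fun y => y) m ≤ (fun y => y) i := PySem.List.min?_isMin hmq i hiL
      have : m = i := Nat.le_antisymm hmle (hlow m hmmem)
      simp [this]

-- ===== VERDICT (by name: the statement is the Claim_ definition above) =====
theorem find_diagonal_spec : Claim_equal_find_diagonal := by
  intro cs _
  unfold Spec_find_diagonal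
  exact find_diagonal_equiv cs
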